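-- pv_equiv track=rewrite | github.com/hoangphuccoder123/algorithm | đề ôn tập/đề 9/de10/bai2.py | number_with_most_divisors
-- ===== SOURCE A (Python) =====
-- def count_divisors(n):
--     count = 0
--     for i in range(1, n + 1):
--         if n % i == 0:
--             count += 1
--     return count
--
-- def number_with_most_divisors(n):
--     max_divisors = 0
--     result = 1
--
--     for i in range(1, n + 1):
--         current_divisors = count_divisors(i)
--         if current_divisors > max_divisors:
--             max_divisors = current_divisors
--             result = i
--         elif current_divisors == max_divisors:
--             result = min(result, i)
--
--     return result
-- ===== SOURCE B (Python) =====
-- def number_with_most_divisors(n):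
--     # Divisor-count sieve: for each d, bump every multiple of d; then scan for the first maximum.
--     cnt = {}
--     for d in range(1, n + 1):
--         for m in range(d, n + 1, d):
--             cnt[m] = cnt.get(m, 0) + 1
--     max_divisors = 0
--     result = 1
--     for i in range(1, n + 1):
--         if cnt.get(i, 0) > max_divisors:
--             max_divisors = cnt.get(i, 0)
--             result = i
--     return result
-- ===== Notes on version B (the rewrite author's own statement) =====
-- stated objective: faster
-- what changed: Replaces per-number trial division (count_divisors called for every i up to n) with a single divisor-count sieve that bumps a counter for each d's multiples, then one linear scan for the first maximum.
import Mathlib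
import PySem

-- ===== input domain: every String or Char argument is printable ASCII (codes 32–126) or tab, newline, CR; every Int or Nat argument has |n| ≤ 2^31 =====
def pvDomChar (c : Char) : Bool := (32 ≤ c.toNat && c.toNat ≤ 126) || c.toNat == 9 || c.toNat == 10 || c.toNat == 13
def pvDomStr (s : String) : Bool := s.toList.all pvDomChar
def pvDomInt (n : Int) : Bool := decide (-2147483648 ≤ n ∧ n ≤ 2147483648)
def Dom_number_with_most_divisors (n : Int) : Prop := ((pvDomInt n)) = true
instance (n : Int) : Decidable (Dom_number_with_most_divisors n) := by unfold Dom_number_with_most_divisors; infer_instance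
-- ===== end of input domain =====

-- B replaces A's per-number trial division (quadratic) by a divisor-count sieve over the multiples of each d, then one scan; same result, asymptotically faster.

-- ===== PORT A =====
def count_divisors (n : Int) : Int :=
  (PySem.List.pyRange 1 (n + 1) 1).foldl
    (fun count i => if PySem.Int.mod n i = 0 then count + 1 else count) 0

def number_with_most_divisors (n : Int) : Int :=
  ((PySem.List.pyRange 1 (n + 1) 1).foldl
    (fun s i =>
      let c := count_divisors i
      if c > s.1 then (c, i)
      else if c = s.1 then (s.1, min s.2 i)
      else s)
    (0, 1)).2

-- ===== PORT B =====
def nwmd_sieve (n : Int) : PySem.Dict Int Int :=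
  (PySem.List.pyRange 1 (n + 1) 1).foldl
    (fun cnt d =>
      (PySem.List.pyRange d (n + 1) d).foldl
        (fun cnt m => cnt.insert m (cnt.getD m 0 + 1)) cnt)
    PySem.Dict.empty

def number_with_most_divisors_alt (n : Int) : Int :=
  let cnt := nwmd_sieve n
  ((PySem.List.pyRange 1 (n + 1) 1).foldl
    (fun s i => if cnt.getD i 0 > s.1 then (cnt.getD i 0, i) else s)
    (0, 1)).2

-- ===== PRECONDITION & SPEC =====
def Spec_number_with_most_divisors (n : Int) (out : Int) : Prop := out = number_with_most_divisors_alt n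
instance (n : Int) (out : Int) : Decidable (Spec_number_with_most_divisors n out) := by unfold Spec_number_with_most_divisors; infer_instance

-- ===== CLAIM (what is proved, stated in full; the proofs are below) =====
def Claim_equal_number_with_most_divisors : Prop := ∀ (n : Int), Dom_number_with_most_divisors n → Spec_number_with_most_divisors n (number_with_most_divisors n)

-- ===== LEMMAS AND PROOFS =====

lemma nwmd_nodup_pyRange_pos (a b s : Int) (hs : 0 < s) :
    (PySem.List.pyRange a b s).Nodup := by
  rw [PySem.List.pyRange_of_pos a b hs]
  refine List.Nodup.map ?_ (List.nodup_range)
  intro x y h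
  have hx : s * (x : Int) = s * (y : Int) := by linarith
  have := mul_left_cancel₀ (ne_of_gt hs) hx
  exact_mod_cast this

-- the divisor-count sieve, characterised: each d ∈ ds with 0 < d adds 1 to key v iff v lies in its multiple range
lemma nwmd_sieve_aux_getD (n : Int) (ds : List Int) (cnt : PySem.Dict Int Int) (v : Int)
    (h : ∀ d ∈ ds, 0 < d) :
    (ds.foldl
      (fun cnt d =>
        (PySem.List.pyRange d (n + 1) d).foldl
          (fun cnt m => cnt.insert m (cnt.getD m 0 + 1)) cnt)
      cnt).getD v 0
    = cnt.getD v 0 + (ds.countP (fun d => decide (v ∈ PySem.List.pyRange d (n + 1) d)) : Int) := by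
  induction ds generalizing cnt with
  | nil => simp
  | cons d ds ih =>
    have hd : 0 < d := h d (by simp)
    rw [List.foldl_cons, ih _ (fun x hx => h x (by simp [hx])), List.countP_cons]
    rw [PySem.Dict.getD_foldl_insert_add_one]
    by_cases hmem : v ∈ PySem.List.pyRange d (n + 1) d
    · rw [List.count_eq_one_of_mem (nwmd_nodup_pyRange_pos d (n + 1) d hd) hmem]
      simp [hmem]; ring
    · rw [List.count_eq_zero.2 hmem]
      simp [hmem]

-- A's trial-division count equals the sieve's count-by-multiples, for 1 ≤ i ≤ n
lemma nwmd_counts_eq (n i : Int) (h1 : 1 ≤ i) (h2 : i ≤ n) :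
    count_divisors i
    = ((PySem.List.pyRange 1 (n + 1) 1).countP
        (fun d => decide (i ∈ PySem.List.pyRange d (n + 1) d)) : Int) := by
  unfold count_divisors
  rw [PySem.List.foldl_ite_add_one (fun j => PySem.Int.mod i j = 0)]
  rw [PySem.List.pyRange_one_append 1 (i + 1) (n + 1) (by omega) (by omega), List.countP_append]
  have h2' : ((PySem.List.pyRange (i + 1) (n + 1) 1).countP
      (fun d => decide (i ∈ PySem.List.pyRange d (n + 1) d))) = 0 := by
    rw [List.countP_eq_zero]
    intro d hd
    rw [PySem.List.mem_pyRange_one] at hd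
    simp only [decide_eq_true_eq]
    intro hmem
    rw [PySem.List.mem_pyRange_iff_of_pos (by omega)] at hmem
    omega
  rw [h2']
  have h1' : ((PySem.List.pyRange 1 (i + 1) 1).countP
        (fun d => decide (i ∈ PySem.List.pyRange d (n + 1) d)))
      = ((PySem.List.pyRange 1 (i + 1) 1).countP (fun j => decide (PySem.Int.mod i j = 0))) := by
    apply List.countP_congr
    intro d hd
    rw [PySem.List.mem_pyRange_one] at hd
    have hdpos : 0 < d := by omega
    simp only [decide_eq_true_eq]
    rw [PySem.List.mem_pyRange_iff_of_pos hdpos, PySem.Int.mod_eq_zero_iff_dvd]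
    constructor
    · rintro ⟨-, -, hdvd⟩
      have := dvd_add hdvd (dvd_refl d)
      simpa using this
    · intro hdvd
      exact ⟨by omega, by omega, dvd_sub hdvd (dvd_refl d)⟩
  rw [h1']
  push_cast
  ring

-- the two selection scans agree whenever the two count sources agree on the scanned range
lemma nwmd_scan_eq (f g : Int → Int) :
    ∀ (k : Nat) (a b : Int), (b - a).toNat = k →
    ∀ (m r : Int), r ≤ a → (∀ i, a ≤ i → i < b → f i = g i) →
    ((PySem.List.pyRange a b 1).foldl
      (fun s i =>
        let c := f i
        if c > s.1 then (c, i) else if c = s.1 then (s.1, min s.2 i) else s)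
      (m, r))
    = ((PySem.List.pyRange a b 1).foldl
      (fun s i => if g i > s.1 then (g i, i) else s)
      (m, r)) := by
  intro k
  induction k with
  | zero =>
    intro a b hk m r _ _
    rw [PySem.List.pyRange_one_eq_nil (by omega)]
    rfl
  | succ k ih =>
    intro a b hk m r hr hfg
    have hab : a < b := by omega
    rw [PySem.List.pyRange_one_cons hab, List.foldl_cons, List.foldl_cons]
    have hfa : f a = g a := hfg a le_rfl hab
    simp only [hfa]
    have hmin : min r a = r := min_eq_left hr
    by_cases hgt : g a > m
    · simp only [if_pos hgt]
      exact ih (a + 1) b (by omega) (g a) a (by omega)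
        (fun i hi hib => hfg i (by omega) hib)
    · simp only [if_neg hgt]
      by_cases heq : g a = m
      · simp only [if_pos heq, hmin]
        exact ih (a + 1) b (by omega) m r (by omega)
          (fun i hi hib => hfg i (by omega) hib)
      · simp only [if_neg heq]
        exact ih (a + 1) b (by omega) m r (by omega)
          (fun i hi hib => hfg i (by omega) hib)

lemma nwmd_sieve_getD (n i : Int) (h1 : 1 ≤ i) (h2 : i ≤ n) :
    count_divisors i = (nwmd_sieve n).getD i 0 := by
  unfold nwmd_sieve
  rw [nwmd_sieve_aux_getD n _ _ i
    (fun d hd => by rw [PySem.List.mem_pyRange_one] at hd; omega)]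
  rw [PySem.Dict.getD_empty]
  rw [nwmd_counts_eq n i h1 h2]
  ring

-- ===== VERDICT (by name: the statement is the Claim_ definition above) =====
theorem number_with_most_divisors_spec : Claim_equal_number_with_most_divisors := by
  intro n _
  unfold Spec_number_with_most_divisors number_with_most_divisors number_with_most_divisors_alt
  have := nwmd_scan_eq count_divisors (fun i => (nwmd_sieve n).getD i 0)
    (n + 1 - 1).toNat 1 (n + 1) rfl 0 1 le_rfl
    (fun i hi hib => nwmd_sieve_getD n i hi (by omega))
  rw [this]
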